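-- pv_equiv track=rewrite | github.com/SkyanSam/DeltaTile | deltaFile.py | find
-- ===== SOURCE A (Python) =====
-- def find(string,array,num,returnNum):
--     val = ""
--     i = 0
--     while i < len(array):
--         if array[i][num] == string:
--             val = array[i][returnNum]
--         i += 1
--
--     return val
-- ===== SOURCE B (Python) =====
-- def find(string, array, num, returnNum):
--     for row in reversed(array):
--         if row[num] == string:
--             return row[returnNum]
--     return ""
-- ===== Notes on version B (the rewrite author's own statement) =====
-- stated objective: simpler
-- what changed: Backward scan with early exit at the first (i.e. last-in-forward-order) match replaces the forward full scan that keeps overwriting an accumulator.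
import Mathlib
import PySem

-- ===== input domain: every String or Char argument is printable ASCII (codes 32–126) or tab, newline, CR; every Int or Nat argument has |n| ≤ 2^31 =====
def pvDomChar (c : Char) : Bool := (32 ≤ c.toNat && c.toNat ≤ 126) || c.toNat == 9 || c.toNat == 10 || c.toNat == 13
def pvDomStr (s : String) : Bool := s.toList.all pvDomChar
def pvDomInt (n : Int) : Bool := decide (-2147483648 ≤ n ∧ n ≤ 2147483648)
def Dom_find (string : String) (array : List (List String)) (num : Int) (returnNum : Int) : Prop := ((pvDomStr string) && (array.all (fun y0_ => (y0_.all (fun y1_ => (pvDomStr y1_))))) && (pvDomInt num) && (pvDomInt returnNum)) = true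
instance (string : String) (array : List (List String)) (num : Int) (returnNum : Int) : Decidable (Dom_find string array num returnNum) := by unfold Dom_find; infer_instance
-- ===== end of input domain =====

-- B replaces A's forward scan (which overwrites an accumulator on every match) by a
-- backward scan that returns at the first match seen from the end; simpler, same result.

-- ===== PORT A =====
-- forward loop: val overwritten on every matching row (row[num], row[returnNum] via pyGet?)
def find (string : String) (array : List (List String)) (num : Int) (returnNum : Int) : String :=
  array.foldl
    (fun val row =>
      if PySem.List.pyGet? row num = some string then
        (PySem.List.pyGet? row returnNum).getD ""
      else val)
    ""

-- ===== PORT B =====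
-- backward scan: first match from the end wins
def findRev (string : String) (num : Int) (returnNum : Int) : List (List String) → String
  | [] => ""
  | row :: rest =>
      if PySem.List.pyGet? row num = some string then
        (PySem.List.pyGet? row returnNum).getD ""
      else findRev string num returnNum rest

def find_alt (string : String) (array : List (List String)) (num : Int) (returnNum : Int) : String :=
  findRev string num returnNum array.reverse

-- ===== PRECONDITION & SPEC =====
-- Pre_: the Python A raises IndexError when some row has no num-th element, or a matching
-- row has no returnNum-th element (Python negative indices allowed); exactly those inputs are excluded.
def Pre_find (string : String) (array : List (List String)) (num : Int) (returnNum : Int) : Prop :=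
  ∀ row ∈ array, (PySem.List.pyGet? row num).isSome ∧
    (PySem.List.pyGet? row num = some string → (PySem.List.pyGet? row returnNum).isSome)
instance (string : String) (array : List (List String)) (num : Int) (returnNum : Int) : Decidable (Pre_find string array num returnNum) := by unfold Pre_find; infer_instance

def pvWitness_find : String × List (List String) × Int × Int :=
  ("a", [["b", "y"], ["a", "x"]], 0, 1)

def Spec_find (string : String) (array : List (List String)) (num : Int) (returnNum : Int) (out : String) : Prop := out = find_alt string array num returnNum
instance (string : String) (array : List (List String)) (num : Int) (returnNum : Int) (out : String) : Decidable (Spec_find string array num returnNum out) := by unfold Spec_find; infer_instance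

-- ===== CLAIM (what is proved, stated in full; the proofs are below) =====
def Claim_equal_find : Prop := ∀ (string : String) (array : List (List String)) (num : Int) (returnNum : Int), Dom_find string array num returnNum → Pre_find string array num returnNum → Spec_find string array num returnNum (find string array num returnNum)

-- ===== LEMMAS AND PROOFS =====

-- no match anywhere ⇒ the backward scan returns ""
theorem findRev_eq_empty (string : String) (num returnNum : Int) (l : List (List String))
    (h : ∀ row ∈ l, ¬ PySem.List.pyGet? row num = some string) :
    findRev string num returnNum l = "" := by
  induction l with
  | nil => rfl
  | cons row rest ih =>
      simp only [findRev]
      rw [if_neg (h row (by simp))]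
      exact ih (fun r hr => h r (by simp [hr]))

-- folding A's step over the reverse of r equals: last-match value if r has a match, else val
theorem foldl_rev_eq (string : String) (num returnNum : Int) :
    ∀ (r : List (List String)) (val : String),
      r.reverse.foldl
        (fun val row =>
          if PySem.List.pyGet? row num = some string then
            (PySem.List.pyGet? row returnNum).getD ""
          else val) val
      = if (∃ row ∈ r, PySem.List.pyGet? row num = some string)
          then findRev string num returnNum r else val := by
  intro r
  induction r with
  | nil => intro val; simp
  | cons row rest ih =>
      intro val
      simp only [List.reverse_cons, List.foldl_append, List.foldl_cons, List.foldl_nil]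
      rw [ih val]
      by_cases hm : PySem.List.pyGet? row num = some string
      · have hex : ∃ r' ∈ row :: rest, PySem.List.pyGet? r' num = some string :=
          ⟨row, by simp, hm⟩
        rw [if_pos hm, if_pos hex]
        simp [findRev, hm]
      · simp only [findRev, if_neg hm]
        by_cases he : ∃ r' ∈ rest, PySem.List.pyGet? r' num = some string
        · rw [if_pos he, if_pos (by obtain ⟨r', hr', h⟩ := he; exact ⟨r', by simp [hr'], h⟩)]
        · rw [if_neg he, if_neg (by
            rintro ⟨r', hr', h⟩
            rcases List.mem_cons.mp hr' with h1 | h1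
            · exact hm (h1 ▸ h)
            · exact he ⟨r', h1, h⟩)]

theorem find_eq_alt (string : String) (array : List (List String)) (num returnNum : Int) :
    find string array num returnNum = find_alt string array num returnNum := by
  unfold find find_alt
  have h := foldl_rev_eq string num returnNum array.reverse ""
  rw [List.reverse_reverse] at h
  rw [h]
  by_cases he : ∃ row ∈ array.reverse, PySem.List.pyGet? row num = some string
  · rw [if_pos he]
  · rw [if_neg he, findRev_eq_empty string num returnNum array.reverse
      (fun r hr h => he ⟨r, hr, h⟩)]

-- ===== VERDICT (by name: the statement is the Claim_ definition above) =====
theorem find_spec : Claim_equal_find := by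
  intro string array num returnNum _ _
  exact find_eq_alt string array num returnNum
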